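-- pv_equiv track=rewrite | github.com/hyperskill/hyperstyle-analysis-prod | templates/src/templates/diffs/filter_by_diff.py | issues_offsets_to_positions
-- ===== SOURCE A (Python) =====
-- import bisect
-- from typing import List, Tuple, Optional
--
-- def get_code_prefix_lengths(code_lines: List[str]) -> List[int]:
--     code_prefix_length = [0]
--     for code_line in code_lines:
--         code_prefix_length.append(code_prefix_length[-1] + len(code_line))
--
--     return code_prefix_length
--
-- def issues_offsets_to_positions(offsets: List[int], code_lines: List[str]) -> List[Tuple[int, int]]:
--     code_prefix_lengths = get_code_prefix_lengths(code_lines)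
--
--     issues_positions = []
--     for offset in offsets:
--         line_number = bisect.bisect_right(code_prefix_lengths, offset)
--         if line_number == 0:
--             column_number = offset
--         else:
--             column_number = offset - code_prefix_lengths[line_number - 1]
--         issues_positions.append((line_number, column_number))
--
--     return issues_positions
-- ===== SOURCE B (Python) =====
-- def _boundaries(code_lines):
--     """Yield the running start offsets of each line plus the end offset: 0, len(l0), len(l0)+len(l1), ..."""
--     total = 0
--     yield total
--     for code_line in code_lines:
--         total += len(code_line)
--         yield total
--
--
-- def issues_offsets_to_positions(offsets, code_lines):
--     positions = []
--     for offset in offsets: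
--         line_number, column_number = 0, offset
--         for i, boundary in enumerate(_boundaries(code_lines)):
--             if boundary > offset:
--                 break
--             line_number, column_number = i + 1, offset - boundary
--         positions.append((line_number, column_number))
--     return positions
-- ===== Notes on version B (the rewrite author's own statement) =====
-- stated objective: alternative
-- what changed: Replaced the precomputed prefix-length array plus bisect_right binary search with a linear scan over a boundary generator that keeps the last boundary <= offset and its index.
import Mathlib
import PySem

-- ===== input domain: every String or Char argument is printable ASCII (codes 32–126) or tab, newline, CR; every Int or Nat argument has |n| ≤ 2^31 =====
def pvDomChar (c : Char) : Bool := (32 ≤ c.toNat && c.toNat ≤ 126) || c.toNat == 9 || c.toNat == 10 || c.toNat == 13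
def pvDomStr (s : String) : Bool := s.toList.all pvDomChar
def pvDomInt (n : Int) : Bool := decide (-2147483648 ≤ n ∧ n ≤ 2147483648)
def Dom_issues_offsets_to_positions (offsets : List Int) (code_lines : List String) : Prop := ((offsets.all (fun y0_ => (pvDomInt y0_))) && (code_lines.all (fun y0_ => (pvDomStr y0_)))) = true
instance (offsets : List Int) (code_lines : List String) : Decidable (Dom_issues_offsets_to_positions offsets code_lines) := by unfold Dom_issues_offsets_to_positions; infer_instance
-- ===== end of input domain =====

-- B replaces the prefix-length array + bisect_right binary search with a linear scan
-- that keeps the last line boundary ≤ offset and its index (objective: alternative).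

-- ===== PORT A =====
-- bisect.bisect_right, a stdlib call: the lists it is applied to in this function
-- (prefix-length lists) are always nondecreasing, and on a nondecreasing list
-- bisect_right returns the number of elements ≤ x (its documented contract); ported
-- as that count, exact for every call this program makes.
def pyBisectRight (a : List Int) (x : Int) : Nat :=
  (a.takeWhile (fun e => e ≤ x)).length

def get_code_prefix_lengths (code_lines : List String) : List Int :=
  code_lines.foldl
    (fun acc code_line => acc ++ [(PySem.List.pyGet? acc (-1)).getD 0 + PySem.Str.len code_line])
    [0]

def issues_offsets_to_positions (offsets : List Int) (code_lines : List String) : List (Int × Int) :=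
  let code_prefix_lengths := get_code_prefix_lengths code_lines
  offsets.foldl
    (fun issues_positions offset =>
      let line_number := pyBisectRight code_prefix_lengths offset
      let column_number : Int :=
        if line_number = 0 then offset
        else offset - (PySem.List.pyGet? code_prefix_lengths ((line_number : Int) - 1)).getD 0
      issues_positions ++ [((line_number : Int), column_number)])
    []

-- ===== PORT B =====
-- Source B's _boundaries generator, as the list of values it yields after the initial 0
def pvBoundariesAux (code_lines : List String) (total : Int) : List Int :=
  match code_lines with
  | [] => []
  | code_line :: rest =>
    (total + PySem.Str.len code_line) :: pvBoundariesAux rest (total + PySem.Str.len code_line)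

def pvBoundaries (code_lines : List String) : List Int := 0 :: pvBoundariesAux code_lines 0

-- Source B's inner 'for i, boundary in enumerate(...): if boundary > offset: break; ...' loop
def pvScan (bs : List Int) (i : Nat) (offset : Int) (line_number column_number : Int) : Int × Int :=
  match bs with
  | [] => (line_number, column_number)
  | boundary :: rest =>
    if boundary > offset then (line_number, column_number)
    else pvScan rest (i + 1) offset ((i : Int) + 1) (offset - boundary)

def issues_offsets_to_positions_alt (offsets : List Int) (code_lines : List String) : List (Int × Int) :=
  offsets.map (fun offset => pvScan (pvBoundaries code_lines) 0 offset 0 offset)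

-- ===== PRECONDITION & SPEC =====
def Spec_issues_offsets_to_positions (offsets : List Int) (code_lines : List String) (out : List (Int × Int)) : Prop := out = issues_offsets_to_positions_alt offsets code_lines
instance (offsets : List Int) (code_lines : List String) (out : List (Int × Int)) : Decidable (Spec_issues_offsets_to_positions offsets code_lines out) := by unfold Spec_issues_offsets_to_positions; infer_instance

-- ===== CLAIM (what is proved, stated in full; the proofs are below) =====
def Claim_equal_issues_offsets_to_positions : Prop := ∀ (offsets : List Int) (code_lines : List String), Dom_issues_offsets_to_positions offsets code_lines → Spec_issues_offsets_to_positions offsets code_lines (issues_offsets_to_positions offsets code_lines)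

-- ===== LEMMAS AND PROOFS =====

theorem get_code_prefix_lengths_aux (cl : List String) (pre : List Int) (b : Int) :
    cl.foldl
      (fun acc code_line => acc ++ [(PySem.List.pyGet? acc (-1)).getD 0 + PySem.Str.len code_line])
      (pre ++ [b]) = pre ++ b :: pvBoundariesAux cl b := by
  induction cl generalizing pre b with
  | nil => simp [pvBoundariesAux]
  | cons l rest ih =>
    simp only [List.foldl_cons, pvBoundariesAux]
    rw [PySem.List.pyGet?_neg_one_append_singleton]
    have h := ih (pre ++ [b]) (b + PySem.Str.len l)
    simpa using h

theorem get_code_prefix_lengths_eq (cl : List String) :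
    get_code_prefix_lengths cl = pvBoundaries cl := by
  have h := get_code_prefix_lengths_aux cl [] 0
  simpa [get_code_prefix_lengths, pvBoundaries] using h

theorem pyGet?_cons_pos (x : Int) (xs : List Int) (i : Int) (hi : 1 ≤ i) :
    PySem.List.pyGet? (x :: xs) i = PySem.List.pyGet? xs (i - 1) := by
  have h0 : 0 ≤ i - 1 := by omega
  obtain ⟨n, hn⟩ := Int.eq_ofNat_of_zero_le h0
  have h1 : PySem.List.pyGet? (x :: xs) ((i - 1) + 1) = PySem.List.pyGet? xs (i - 1) := by
    rw [hn]; exact PySem.List.pyGet?_cons_succ x xs n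
  simpa using h1

-- B's scan computes the count of the leading boundaries ≤ o and the last of them,
-- i.e. exactly A's bisect_right count / indexed lookup on the same list.
theorem scan_eq (o : Int) : ∀ (bs : List Int) (i : Nat) (line col : Int),
    pvScan bs i o line col =
      (let k := (bs.takeWhile (fun e => e ≤ o)).length
       if k = 0 then (line, col)
       else ((i : Int) + k, o - (PySem.List.pyGet? bs ((k : Int) - 1)).getD 0)) := by
  intro bs
  induction bs with
  | nil => intro i line col; simp [pvScan]
  | cons b rest ih =>
    intro i line col
    by_cases hb : b > o
    · have htw : ((b :: rest).takeWhile (fun e => e ≤ o)) = [] := by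
        simp [List.takeWhile_cons]; omega
      simp [pvScan, hb, htw]
    · have hble : b ≤ o := by omega
      have htw : ((b :: rest).takeWhile (fun e => e ≤ o))
          = b :: (rest.takeWhile (fun e => e ≤ o)) := by simp [hble]
      simp only [pvScan, if_neg hb, htw, List.length_cons]
      rw [ih (i + 1) ((i : Int) + 1) (o - b)]
      set k := (rest.takeWhile (fun e => e ≤ o)).length with hk
      by_cases hk0 : k = 0
      · simp only [hk0]
        norm_num [PySem.List.pyGet?_zero_cons]
      · rw [if_neg hk0, if_neg (by omega : ¬ k + 1 = 0)]
        have hcast : ((k + 1 : Nat) : Int) - 1 = (k : Int) := by push_cast; omega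
        rw [hcast, pyGet?_cons_pos b rest (k : Int) (by exact_mod_cast Nat.one_le_iff_ne_zero.mpr hk0)]
        simp only [Prod.mk.injEq]
        exact ⟨by push_cast; ring, trivial⟩

theorem foldl_push {α β : Type} (l : List α) (f : α → β) (init : List β) :
    l.foldl (fun acc x => acc ++ [f x]) init = init ++ l.map f := by
  induction l generalizing init with
  | nil => simp
  | cons x xs ih => simp [ih]

theorem per_offset (cl : List String) (o : Int) :
    (let P := get_code_prefix_lengths cl
     let ln := pyBisectRight P o
     ((ln : Int),
      if ln = 0 then o else o - (PySem.List.pyGet? P ((ln : Int) - 1)).getD 0))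
    = pvScan (pvBoundaries cl) 0 o 0 o := by
  rw [scan_eq o (pvBoundaries cl) 0 0 o]
  simp only [get_code_prefix_lengths_eq, pyBisectRight]
  set k := ((pvBoundaries cl).takeWhile (fun e => e ≤ o)).length with hk
  by_cases hk0 : k = 0
  · simp [hk0]
  · simp [hk0]

-- ===== VERDICT (by name: the statement is the Claim_ definition above) =====
theorem issues_offsets_to_positions_spec : Claim_equal_issues_offsets_to_positions := by
  intro offsets code_lines _
  unfold Spec_issues_offsets_to_positions
  unfold issues_offsets_to_positions issues_offsets_to_positions_alt
  rw [foldl_push]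
  simp only [List.nil_append]
  apply List.map_congr_left
  intro o _
  exact per_offset code_lines o
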